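-- pv_equiv track=rewrite | github.com/Majbor1/mocktests3 | mocktest3 - 1/p7.py | f
-- ===== SOURCE A (Python) =====
-- def f(arr2D):
--     num_col = len(arr2D[0])
--
--     col_sums = []
--
--     for col in range(num_col):
--         col_sum = sum(row[col] for row in arr2D)
--         if col_sum in col_sums:
--             return True
--         col_sums.append(col_sum)
--
--     return False
-- ===== SOURCE B (Python) =====
-- def f(arr2D):
--     num_col = len(arr2D[0])
--     sums = [sum(row[col] for row in arr2D) for col in range(num_col)]
--     return len(set(sums)) != len(sums)
-- ===== Notes on version B (the rewrite author's own statement) =====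
-- stated objective: simpler
-- what changed: B builds the full list of column sums in one comprehension and decides duplication by comparing len(set(sums)) with len(sums), removing A's running accumulator, per-column membership scan and early return.
-- outside the precondition, e.g. on f([[1, 1, 5], [2, 2]]): A returns True, B raises IndexError
import Mathlib
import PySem

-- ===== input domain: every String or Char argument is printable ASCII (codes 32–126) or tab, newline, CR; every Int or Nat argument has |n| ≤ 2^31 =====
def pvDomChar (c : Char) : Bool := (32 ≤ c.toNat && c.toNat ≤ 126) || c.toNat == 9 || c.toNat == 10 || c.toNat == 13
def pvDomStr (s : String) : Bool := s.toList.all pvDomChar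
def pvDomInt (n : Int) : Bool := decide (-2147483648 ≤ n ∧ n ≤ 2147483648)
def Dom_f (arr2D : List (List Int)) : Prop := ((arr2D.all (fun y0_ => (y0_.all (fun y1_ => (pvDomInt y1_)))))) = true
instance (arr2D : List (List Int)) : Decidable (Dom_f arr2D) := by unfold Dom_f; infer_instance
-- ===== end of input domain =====

-- B replaces A's running accumulator with per-column membership test and early return by one
-- build pass over all column sums followed by a whole-list set/length duplication check (simpler).

-- ===== PORT A =====
-- sum(row[col] for row in arr2D); the pyGetD default is never used under Pre_f
def colSumA (arr2D : List (List Int)) (c : Int) : Int :=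
  (arr2D.map (fun row => PySem.List.pyGetD row c 0)).sum

def fGo (arr2D : List (List Int)) : List Int → List Int → Bool
  | [], _ => false
  | c :: rest, colSums =>
    let colSum := colSumA arr2D c
    if colSums.contains colSum then true
    else fGo arr2D rest (colSums ++ [colSum])

def f (arr2D : List (List Int)) : Bool :=
  fGo arr2D (PySem.List.pyRange 0 ((PySem.List.pyGetD arr2D 0 []).length : Int) 1) []

-- ===== PORT B =====
def f_alt (arr2D : List (List Int)) : Bool :=
  -- sums = [sum(row[col] for row in arr2D) for col in range(num_col)]
  let sums := (PySem.List.pyRange 0 ((PySem.List.pyGetD arr2D 0 []).length : Int) 1).map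
    (fun col => (arr2D.map (fun row => PySem.List.pyGetD row col 0)).sum)
  (PySem.Set.ofList sums).length != sums.length

-- ===== PRECONDITION & SPEC =====
-- Pre_f excludes the inputs on which the Pythons raise IndexError: empty arr2D (arr2D[0]) and
-- ragged arrays where some row is shorter than the first (row[col]); on a ragged array A may
-- still return True when a duplicate appears before the short column, while B (which builds all
-- column sums first) raises there.
def Pre_f (arr2D : List (List Int)) : Prop :=
  arr2D ≠ [] ∧ ∀ row ∈ arr2D, (arr2D.headD []).length ≤ row.length
instance (arr2D : List (List Int)) : Decidable (Pre_f arr2D) := by unfold Pre_f; infer_instance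
def pvWitness_f : List (List Int) := [[1, 2], [3, 4]]

def Spec_f (arr2D : List (List Int)) (out : Bool) : Prop := out = f_alt arr2D
instance (arr2D : List (List Int)) (out : Bool) : Decidable (Spec_f arr2D out) := by unfold Spec_f; infer_instance

-- ===== CLAIM (what is proved, stated in full; the proofs are below) =====
def Claim_equal_f : Prop := ∀ (arr2D : List (List Int)), Dom_f arr2D → Pre_f arr2D → Spec_f arr2D (f arr2D)

-- ===== LEMMAS AND PROOFS =====

-- A's loop, abstracted over the list of column sums it computes
def dupLoop : List Int → List Int → Bool
  | [], _ => false
  | s :: rest, acc => if acc.contains s then true else dupLoop rest (acc ++ [s])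

theorem fGo_eq_dupLoop (arr2D : List (List Int)) :
    ∀ (cols acc : List Int), fGo arr2D cols acc = dupLoop (cols.map (colSumA arr2D)) acc := by
  intro cols
  induction cols with
  | nil => intro acc; rfl
  | cons c rest ih =>
    intro acc
    simp only [fGo, dupLoop, List.map_cons]
    split <;> simp [ih]

theorem dupLoop_eq_true_iff :
    ∀ (l acc : List Int), acc.Nodup → (dupLoop l acc = true ↔ ¬ (acc ++ l).Nodup) := by
  intro l
  induction l with
  | nil => intro acc h; simp [dupLoop, h]
  | cons s rest ih =>
    intro acc hacc
    simp only [dupLoop]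
    by_cases hmem : s ∈ acc
    · rw [if_pos (List.contains_iff_mem.mpr hmem)]
      constructor
      · intro _ hnd
        rw [List.nodup_append] at hnd
        exact hnd.2.2 s hmem s List.mem_cons_self rfl
      · intro _; rfl
    · have hc : acc.contains s = false := Bool.eq_false_iff.mpr (fun h => hmem (List.contains_iff_mem.mp h))
      simp only [hc, Bool.false_eq_true, if_false]
      have hacc' : (acc ++ [s]).Nodup := by
        simp [List.nodup_append, hacc]
        exact fun a ha h => hmem (h ▸ ha)
      rw [ih (acc ++ [s]) hacc']
      simp

theorem foldl_add_length_le :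
    ∀ (l s : List Int), (List.foldl PySem.Set.add s l).length ≤ s.length + l.length := by
  intro l
  induction l with
  | nil => intro s; simp
  | cons x rest ih =>
    intro s
    have h := ih (PySem.Set.add s x)
    have hx : (PySem.Set.add s x).length ≤ s.length + 1 := by
      simp only [PySem.Set.add]
      split
      · omega
      · simp
    simp only [List.foldl_cons, List.length_cons]
    omega

theorem foldl_add_length_eq_iff :
    ∀ (l s : List Int), s.Nodup →
      ((List.foldl PySem.Set.add s l).length = s.length + l.length ↔ (s ++ l).Nodup) := by
  intro l
  induction l with
  | nil => intro s h; simp [h]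
  | cons x rest ih =>
    intro s hs
    simp only [List.foldl_cons, PySem.Set.add, PySem.Set.contains, List.length_cons]
    by_cases hmem : x ∈ s
    · rw [if_pos (List.contains_iff_mem.mpr hmem)]
      constructor
      · intro hlen
        exfalso
        have := foldl_add_length_le rest s
        omega
      · intro hnd
        exfalso
        rw [List.nodup_append] at hnd
        exact hnd.2.2 x hmem x List.mem_cons_self rfl
    · have hc : s.contains x = false := Bool.eq_false_iff.mpr (fun h => hmem (List.contains_iff_mem.mp h))
      simp only [hc, Bool.false_eq_true, if_false]
      have hs' : (s ++ [x]).Nodup := by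
        simp [List.nodup_append, hs]
        exact fun a ha h => hmem (h ▸ ha)
      have h := ih (s ++ [x]) hs'
      simp only [List.length_append, List.length_singleton, List.append_assoc,
        List.singleton_append] at h
      rw [show s.length + (rest.length + 1) = s.length + 1 + rest.length by omega]
      exact h

theorem ofList_length_eq_iff (l : List Int) :
    (PySem.Set.ofList l).length = l.length ↔ l.Nodup := by
  have h := foldl_add_length_eq_iff l [] List.nodup_nil
  simpa [PySem.Set.ofList_eq_foldl] using h

theorem dup_bool_eq (l : List Int) :
    dupLoop l [] = ((PySem.Set.ofList l).length != l.length) := by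
  by_cases hnd : l.Nodup
  · have h1 : dupLoop l [] = false := by
      cases h : dupLoop l [] with
      | false => rfl
      | true =>
        exact absurd (by simpa using (dupLoop_eq_true_iff l [] List.nodup_nil).mp h) (not_not_intro hnd)
    rw [h1, (ofList_length_eq_iff l).mpr hnd]
    simp
  · have h1 : dupLoop l [] = true :=
      (dupLoop_eq_true_iff l [] List.nodup_nil).mpr (by simpa using hnd)
    have h2 : (PySem.Set.ofList l).length ≠ l.length := fun h => hnd ((ofList_length_eq_iff l).mp h)
    rw [h1]
    simp [bne_iff_ne, h2]

-- ===== VERDICT (by name: the statement is the Claim_ definition above) =====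
theorem f_spec : Claim_equal_f := by
  intro arr2D _ _
  unfold Spec_f f f_alt
  rw [fGo_eq_dupLoop]
  exact dup_bool_eq ((PySem.List.pyRange 0 ((PySem.List.pyGetD arr2D 0 []).length : Int) 1).map (colSumA arr2D))
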